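-- pv_equiv track=rewrite | github.com/alexbaryzhikov/codebase-archive | Python/other/tictactoe_states.py | tictactoe_states
-- ===== SOURCE A (Python) =====
-- from functools import reduce
-- from operator  import mul
--
-- def tictactoe_states(size=3):
--     """Returns the number of states in tictactoe game on board of size x size.
--     Mirror states like [xo] and [ox] are counted once, so games with identical
--     moves but x's and o's swapped are considered the same. Winning conditions
--     are ignored"""
--     positions = size**2 # number of positions
--     states = 0
--     crosses = 0
--     zeros = 0
--     while crosses + zeros < positions:
--         states += state_permutations(crosses, zeros, positions)
--         crosses += 1
--         states += state_permutations(crosses, zeros, positions)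
--         zeros += 1
--     if crosses + zeros == positions:
--         states += state_permutations(crosses, zeros, positions)
--     return states
--
-- def state_permutations(crosses, zeros, positions):
--     """Returns the number of all possible placements of fixed amount of crosses
--     and zeros on the board"""
--     crossesPerms = nCk(positions, crosses)
--     zerosPerms = nCk(positions - crosses, zeros)
--     return crossesPerms * zerosPerms
--
-- def nCk(n, k):
--     """Returns the number of combinations of size k from n elements"""
--     numer = int(reduce(mul, (n - i for i in range(k)), 1))
--     denom = int(reduce(mul, (i + 1 for i in range(k)), 1))
--     return numer//denom
-- ===== SOURCE B (Python) =====
-- def tictactoe_states(size=3):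
--     """Count tictactoe board states (mirror-merged) by updating one
--     multinomial coefficient incrementally instead of recomputing nCk."""
--     positions = size * size
--     states = 0
--     term = 1  # = positions! / (crosses! * zeros! * (positions-crosses-zeros)!)
--     crosses = 0
--     zeros = 0
--     while crosses + zeros < positions:
--         states += term
--         term = term * (positions - crosses - zeros) // (crosses + 1)
--         crosses += 1
--         states += term
--         term = term * (positions - crosses - zeros) // (zeros + 1)
--         zeros += 1
--     if crosses + zeros == positions:
--         states += term
--     return states
-- ===== Notes on version B (the rewrite author's own statement) =====
-- stated objective: faster
-- what changed: B maintains one multinomial coefficient updated multiplicatively (term = term*(remaining)//(count+1)) per move instead of recomputing two nCk products from scratch each iteration.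
import Mathlib
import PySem

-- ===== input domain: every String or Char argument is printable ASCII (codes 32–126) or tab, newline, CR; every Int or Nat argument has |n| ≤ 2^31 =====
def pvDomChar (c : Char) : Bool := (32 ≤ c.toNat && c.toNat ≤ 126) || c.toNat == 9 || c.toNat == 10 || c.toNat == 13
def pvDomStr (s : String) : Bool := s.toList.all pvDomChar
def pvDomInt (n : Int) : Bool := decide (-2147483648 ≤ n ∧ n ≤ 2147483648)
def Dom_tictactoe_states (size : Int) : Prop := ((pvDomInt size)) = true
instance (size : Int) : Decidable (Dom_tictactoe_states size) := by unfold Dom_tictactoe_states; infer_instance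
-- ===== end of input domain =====

-- B replaces A's per-step nCk recomputation by one multinomial coefficient updated
-- multiplicatively per move (objective: faster, asymptotically fewer multiplications).

-- ===== PORT A =====
-- nCk(n, k): numer = reduce(mul, (n-i for i in range(k)), 1); denom = reduce(mul, (i+1 for i in range(k)), 1); numer // denom
def pvNCk (n k : Int) : Int :=
  let numer := (PySem.List.pyRange 0 k 1).foldl (fun acc i => acc * (n - i)) 1
  let denom := (PySem.List.pyRange 0 k 1).foldl (fun acc i => acc * (i + 1)) 1
  PySem.Int.floordiv numer denom

-- state_permutations(crosses, zeros, positions)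
def pvStatePerms (crosses zeros positions : Int) : Int :=
  pvNCk positions crosses * pvNCk (positions - crosses) zeros

-- A's while-loop; returns (states, crosses, zeros) at exit
def pvLoopA (positions states crosses zeros : Int) : Int × Int × Int :=
  if crosses + zeros < positions then
    let states1 := states + pvStatePerms crosses zeros positions
    let crosses1 := crosses + 1
    let states2 := states1 + pvStatePerms crosses1 zeros positions
    pvLoopA positions states2 crosses1 (zeros + 1)
  else (states, crosses, zeros)
termination_by (positions - (crosses + zeros)).toNat
decreasing_by omega

def tictactoe_states (size : Int) : Int :=
  let positions := size * size
  let r := pvLoopA positions 0 0 0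
  if r.2.1 + r.2.2 = positions then r.1 + pvStatePerms r.2.1 r.2.2 positions else r.1

-- ===== PORT B =====
-- B's while-loop; returns (states, term, crosses, zeros) at exit
def pvLoopB (positions states term crosses zeros : Int) : Int × Int × Int × Int :=
  if crosses + zeros < positions then
    let states1 := states + term
    let term1 := PySem.Int.floordiv (term * (positions - crosses - zeros)) (crosses + 1)
    let crosses1 := crosses + 1
    let states2 := states1 + term1
    let term2 := PySem.Int.floordiv (term1 * (positions - crosses1 - zeros)) (zeros + 1)
    pvLoopB positions states2 term2 crosses1 (zeros + 1)
  else (states, term, crosses, zeros)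
termination_by (positions - (crosses + zeros)).toNat
decreasing_by omega

def tictactoe_states_alt (size : Int) : Int :=
  let positions := size * size
  let r := pvLoopB positions 0 1 0 0
  if r.2.2.1 + r.2.2.2 = positions then r.1 + r.2.1 else r.1

-- ===== PRECONDITION & SPEC =====
def Spec_tictactoe_states (size : Int) (out : Int) : Prop := out = tictactoe_states_alt size
instance (size : Int) (out : Int) : Decidable (Spec_tictactoe_states size out) := by unfold Spec_tictactoe_states; infer_instance

-- ===== CLAIM (what is proved, stated in full; the proofs are below) =====
def Claim_equal_tictactoe_states : Prop := ∀ (size : Int), Dom_tictactoe_states size → Spec_tictactoe_states size (tictactoe_states size)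

-- ===== LEMMAS AND PROOFS =====

-- the multinomial coefficient positions!/(c! z! (P-c-z)!), as nCk(P,c)*nCk(P-c,z)
def spNat (c z P : Nat) : Nat := P.choose c * (P - c).choose z

lemma numer_eq (n k : Nat) (h : k ≤ n) :
    (PySem.List.pyRange 0 (k : Int) 1).foldl (fun acc i => acc * ((n : Int) - i)) 1
      = ((n.descFactorial k : Nat) : Int) := by
  induction k with
  | zero => simp [PySem.List.pyRange]
  | succ k ih =>
      have hk : (0 : Int) ≤ (k : Int) := by positivity
      have : ((k : Int) + 1) = ((k + 1 : Nat) : Int) := by push_cast; ring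
      rw [← this, PySem.List.pyRange_one_succ_right hk, List.foldl_append,
        ih (by omega)]
      simp only [List.foldl]
      rw [Nat.descFactorial_succ]
      have hkn : (k : Int) ≤ (n : Int) := by exact_mod_cast Nat.le_of_succ_le h
      push_cast [Nat.sub_le, Nat.cast_sub (by omega : k ≤ n)]
      ring

lemma denom_eq (k : Nat) :
    (PySem.List.pyRange 0 (k : Int) 1).foldl (fun acc i => acc * (i + 1)) 1
      = ((k.factorial : Nat) : Int) := by
  induction k with
  | zero => simp [PySem.List.pyRange]
  | succ k ih =>
      have hk : (0 : Int) ≤ (k : Int) := by positivity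
      have : ((k : Int) + 1) = ((k + 1 : Nat) : Int) := by push_cast; ring
      rw [← this, PySem.List.pyRange_one_succ_right hk, List.foldl_append, ih]
      simp only [List.foldl]
      rw [Nat.factorial_succ]
      push_cast
      ring

lemma pvNCk_cast (n k : Nat) (h : k ≤ n) : pvNCk (n : Int) (k : Int) = ((n.choose k : Nat) : Int) := by
  unfold pvNCk
  rw [numer_eq n k h, denom_eq k, PySem.Int.floordiv_natCast,
    ← Nat.choose_eq_descFactorial_div_factorial]

lemma sp_cast (c z P : Nat) (h : c + z ≤ P) :
    pvStatePerms (c : Int) (z : Int) (P : Int) = ((spNat c z P : Nat) : Int) := by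
  unfold pvStatePerms spNat
  have h1 : (P : Int) - (c : Int) = ((P - c : Nat) : Int) := by
    push_cast [Nat.cast_sub (by omega : c ≤ P)]; ring
  rw [pvNCk_cast P c (by omega), h1, pvNCk_cast (P - c) z (by omega)]
  push_cast; ring

-- multiplicative step in crosses
lemma spNat_c_step (c z P : Nat) (h : c + z < P) :
    spNat (c + 1) z P * (c + 1) = spNat c z P * (P - c - z) := by
  have h1 : P.choose (c + 1) * (c + 1) = P.choose c * (P - c) := Nat.choose_succ_right_eq P c
  have h2 : (P - c) * (P - c - 1).choose z = (P - c).choose (z + 1) * (z + 1) := by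
    have hc : P - c = (P - c - 1) + 1 := by omega
    calc (P - c) * (P - c - 1).choose z
        = ((P - c - 1) + 1) * (P - c - 1).choose z := by rw [← hc]
      _ = ((P - c - 1) + 1).choose (z + 1) * (z + 1) := Nat.add_one_mul_choose_eq _ _
      _ = (P - c).choose (z + 1) * (z + 1) := by rw [← hc]
  have h3 : (P - c).choose (z + 1) * (z + 1) = (P - c).choose z * ((P - c) - z) :=
    Nat.choose_succ_right_eq _ _
  simp only [spNat]
  calc P.choose (c + 1) * (P - (c + 1)).choose z * (c + 1)
      = (P.choose (c + 1) * (c + 1)) * (P - (c + 1)).choose z := by ring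
    _ = (P.choose c * (P - c)) * (P - c - 1).choose z := by
        rw [h1]; congr 2
    _ = P.choose c * ((P - c) * (P - c - 1).choose z) := by ring
    _ = P.choose c * ((P - c).choose z * (P - c - z)) := by rw [h2, h3]
    _ = P.choose c * (P - c).choose z * (P - c - z) := by ring

-- multiplicative step in zeros (unconditional)
lemma spNat_z_step (c z P : Nat) :
    spNat (c + 1) (z + 1) P * (z + 1) = spNat (c + 1) z P * (P - (c + 1) - z) := by
  simp only [spNat]
  have h3 : (P - (c + 1)).choose (z + 1) * (z + 1) = (P - (c + 1)).choose z * ((P - (c + 1)) - z) :=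
    Nat.choose_succ_right_eq _ _
  calc P.choose (c + 1) * (P - (c + 1)).choose (z + 1) * (z + 1)
      = P.choose (c + 1) * ((P - (c + 1)).choose (z + 1) * (z + 1)) := by ring
    _ = P.choose (c + 1) * ((P - (c + 1)).choose z * ((P - (c + 1)) - z)) := by rw [h3]
    _ = P.choose (c + 1) * (P - (c + 1)).choose z * (P - (c + 1) - z) := by ring

lemma fd_exact (a b : Nat) (hb : 0 < b) :
    PySem.Int.floordiv ((a * b : Nat) : Int) ((b : Nat) : Int) = (a : Int) := by
  rw [PySem.Int.floordiv_natCast, Nat.mul_div_cancel a hb]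

-- crosses update of B's term
lemma term_c_step (c z P : Nat) (h : c + z < P) :
    PySem.Int.floordiv (((spNat c z P : Nat) : Int) * ((P : Int) - c - z)) ((c : Int) + 1)
      = ((spNat (c + 1) z P : Nat) : Int) := by
  have h1 : ((P : Int) - c - z) = ((P - c - z : Nat) : Int) := by
    push_cast [Nat.cast_sub (by omega : c ≤ P), Nat.cast_sub (by omega : z ≤ P - c)]
    omega
  have h2 : ((c : Int) + 1) = ((c + 1 : Nat) : Int) := by push_cast; ring
  rw [h1, h2, ← Nat.cast_mul, ← spNat_c_step c z P h, fd_exact _ _ (by omega)]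

-- zeros update of B's term
lemma term_z_step (c z P : Nat) (h : c + 1 + z ≤ P) :
    PySem.Int.floordiv (((spNat (c + 1) z P : Nat) : Int) * ((P : Int) - (c + 1) - z)) ((z : Int) + 1)
      = ((spNat (c + 1) (z + 1) P : Nat) : Int) := by
  have h1 : ((P : Int) - (c + 1) - z) = ((P - (c + 1) - z : Nat) : Int) := by
    push_cast [Nat.cast_sub (by omega : c + 1 ≤ P), Nat.cast_sub (by omega : z ≤ P - (c + 1))]
    omega
  have h2 : ((z : Int) + 1) = ((z + 1 : Nat) : Int) := by push_cast; ring
  rw [h1, h2, ← Nat.cast_mul, ← spNat_z_step c z P, fd_exact _ _ (by omega)]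

-- the two loops agree: B's running term is the multinomial A recomputes
lemma loops_agree : ∀ (k P c z : Nat) (s : Int), c + z ≤ P + 1 → P ≤ c + z + k →
    ∃ (s' : Int) (c' z' : Nat),
      pvLoopA (P : Int) s (c : Int) (z : Int) = (s', (c' : Int), (z' : Int)) ∧
      pvLoopB (P : Int) s ((spNat c z P : Nat) : Int) (c : Int) (z : Int)
        = (s', ((spNat c' z' P : Nat) : Int), (c' : Int), (z' : Int)) := by
  intro k
  induction k with
  | zero =>
      intro P c z s h1 h2
      have hstop : ¬ ((c : Int) + z < (P : Int)) := by exact_mod_cast not_lt.mpr (by omega)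
      refine ⟨s, c, z, ?_, ?_⟩
      · rw [pvLoopA]; simp [hstop]
      · rw [pvLoopB]; simp [hstop]
  | succ k ih =>
      intro P c z s h1 h2
      by_cases hlt : c + z < P
      · have hlt' : (c : Int) + z < (P : Int) := by exact_mod_cast hlt
        have hc1 : ((c : Int) + 1) = ((c + 1 : Nat) : Int) := by push_cast; ring
        have hz1 : ((z : Int) + 1) = ((z + 1 : Nat) : Int) := by push_cast; ring
        have hspc : pvStatePerms (c : Int) (z : Int) (P : Int) = ((spNat c z P : Nat) : Int) :=
          sp_cast c z P (by omega)
        have hspc1 : pvStatePerms ((c : Int) + 1) (z : Int) (P : Int)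
            = ((spNat (c + 1) z P : Nat) : Int) := by
          rw [hc1]; exact sp_cast (c + 1) z P (by omega)
        obtain ⟨s', c', z', hA, hB⟩ :=
          ih P (c + 1) (z + 1) (s + ((spNat c z P : Nat) : Int) + ((spNat (c + 1) z P : Nat) : Int))
            (by omega) (by omega)
        refine ⟨s', c', z', ?_, ?_⟩
        · rw [pvLoopA]
          simp only [if_pos hlt', hspc]
          rw [hspc1, hc1, hz1]
          exact hA
        · rw [pvLoopB]
          simp only [if_pos hlt']
          rw [term_c_step c z P hlt]
          have := term_z_step c z P (by omega)
          rw [show ((P : Int) - ((c : Int) + 1) - (z : Int)) = ((P : Int) - (c + 1 : Int) - z) from by ring]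
          rw [this, hc1, hz1]
          exact hB
      · have hstop : ¬ ((c : Int) + z < (P : Int)) := by exact_mod_cast not_lt.mpr (by omega)
        refine ⟨s, c, z, ?_, ?_⟩
        · rw [pvLoopA]; simp [hstop]
        · rw [pvLoopB]; simp [hstop]

-- ===== VERDICT (by name: the statement is the Claim_ definition above) =====
theorem tictactoe_states_spec : Claim_equal_tictactoe_states := by
  intro size _
  unfold Spec_tictactoe_states
  have hP : (0 : Int) ≤ size * size := mul_self_nonneg size
  set P : Nat := (size * size).toNat with hPdef
  have hcast : (P : Int) = size * size := by omega
  have hone : ((spNat 0 0 P : Nat) : Int) = 1 := by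
    unfold spNat; simp
  obtain ⟨s', c', z', hA, hB⟩ := loops_agree P P 0 0 0 (by omega) (by omega)
  simp only [Nat.cast_zero] at hA hB
  rw [hone] at hB
  simp only [tictactoe_states, tictactoe_states_alt, ← hcast, hA, hB]
  by_cases hend : (c' : Int) + (z' : Int) = (P : Int)
  · have hend' : c' + z' = P := by exact_mod_cast hend
    rw [if_pos hend, if_pos hend, sp_cast c' z' P (by omega)]
  · rw [if_neg hend, if_neg hend]
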